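-- pv_equiv track=rewrite | github.com/mattblferrer/leetcode | 2319.py | checkXMatrix
-- ===== SOURCE A (Python) =====
-- def checkXMatrix(grid: list[list[int]]) -> bool:
--     n = len(grid)
--     for i in range(n):
--         for j in range(n):
--             if i == j and grid[i][j] == 0:  # top-left -> bottom-right
--                 return False
--             if i == n - j - 1 and grid[i][j] == 0:  # bottom-left -> top-right
--                 return False
--             if i != j and i != n - j - 1 and grid[i][j] != 0:  # not on diagonal
--                 return False
--     return True
-- ===== SOURCE B (Python) =====
-- def checkXMatrix(grid: list[list[int]]) -> bool:
--     n = len(grid)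
--     nonzero = {(i, j) for i, row in enumerate(grid)
--                for j, x in enumerate(row[:n]) if x}
--     return len(nonzero) == 2 * n - n % 2 and all(
--         (i, i) in nonzero and (i, n - 1 - i) in nonzero for i in range(n))
-- ===== Notes on version B (the rewrite author's own statement) =====
-- stated objective: alternative
-- what changed: Replaces A's per-cell three-way classification by a counting argument: build the set of coordinates of nonzero cells once, then return True iff its cardinality equals the closed-form diagonal count 2n - n%2 and every diagonal coordinate is in the set.
import Mathlib
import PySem

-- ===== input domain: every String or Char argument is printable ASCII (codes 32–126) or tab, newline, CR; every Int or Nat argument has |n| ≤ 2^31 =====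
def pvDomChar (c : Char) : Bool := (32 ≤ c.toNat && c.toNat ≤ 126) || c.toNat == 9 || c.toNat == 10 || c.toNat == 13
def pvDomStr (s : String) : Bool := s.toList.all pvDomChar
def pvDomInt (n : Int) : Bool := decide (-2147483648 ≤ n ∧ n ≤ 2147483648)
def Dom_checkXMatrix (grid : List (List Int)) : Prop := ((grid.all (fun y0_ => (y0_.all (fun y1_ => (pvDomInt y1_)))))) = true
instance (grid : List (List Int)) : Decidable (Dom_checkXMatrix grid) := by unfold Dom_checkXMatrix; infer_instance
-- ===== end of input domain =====

-- B replaces A's per-cell three-way classification by a counting argument: it builds the set of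
-- coordinates of nonzero cells once, then returns True iff its cardinality equals the closed-form
-- diagonal count 2n - n%2 and every diagonal coordinate belongs to it; same O(n^2) cost.

-- ===== PORT A =====
-- one iteration of A's inner body for cell (i,j); Python reads grid[i][j] in exactly one of
-- the three `if` conditions on every (i,j), so a single fetch is exact.
-- outer none = IndexError; some (some b) = early `return b`; some none = fall through.
def pvAStep (grid : List (List Int)) (n i j : Int) : Option (Option Bool) :=
  match PySem.List.pyGet? grid i with
  | none => none
  | some row =>
    match PySem.List.pyGet? row j with
    | none => none
    | some v =>
      if i = j ∧ v = 0 then some (some false)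
      else if i = n - j - 1 ∧ v = 0 then some (some false)
      else if i ≠ j ∧ i ≠ n - j - 1 ∧ v ≠ 0 then some (some false)
      else some none

def pvALoopJ (grid : List (List Int)) (n i : Int) : List Int → Option (Option Bool)
  | [] => some none
  | j :: js =>
    match pvAStep grid n i j with
    | none => none
    | some (some b) => some (some b)
    | some none => pvALoopJ grid n i js

def pvALoopI (grid : List (List Int)) (n : Int) : List Int → Option (Option Bool)
  | [] => some none
  | i :: is =>
    match pvALoopJ grid n i (PySem.List.pyRange 0 n) with
    | none => none
    | some (some b) => some (some b)
    | some none => pvALoopI grid n is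

def checkXMatrix (grid : List (List Int)) : Bool :=
  let n : Int := grid.length
  match pvALoopI grid n (PySem.List.pyRange 0 n) with
  | some (some b) => b
  | some none => true
  | none => false   -- IndexError; unreachable under Pre_checkXMatrix

-- ===== PORT B =====
-- Source B's set comprehension {(i, j) for i, row in enumerate(grid) for j, x in enumerate(row[:n]) if x}
def pvNZ (grid : List (List Int)) (n : Int) : PySem.Set (Int × Int) :=
  PySem.Set.ofList ((PySem.List.enumerate grid).flatMap (fun p =>
    (PySem.List.enumerate (PySem.List.slice p.2 none (some n))).filterMap (fun q =>
      if q.2 ≠ 0 then some (p.1, q.1) else none)))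

def checkXMatrix_alt (grid : List (List Int)) : Bool :=
  let n : Int := grid.length
  let nonzero := pvNZ grid n
  (decide (PySem.Set.len nonzero = 2 * n - PySem.Int.mod n 2)) &&
    (PySem.List.pyRange 0 n).all (fun i =>
      PySem.Set.contains nonzero (i, i) && PySem.Set.contains nonzero (i, n - 1 - i))

-- ===== PRECONDITION & SPEC =====
-- pvCell grid i j is cell (i,j) (0 outside the row); pvGood is the per-cell X-matrix
-- condition: nonzero exactly on the two diagonals.  Used by Pre_ and by the proofs.
def pvCell (grid : List (List Int)) (i j : Nat) : Int := (grid.getD i []).getD j 0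

abbrev pvGood (grid : List (List Int)) (n i j : Nat) : Prop :=
  ((i = j ∨ i + j + 1 = n) → pvCell grid i j ≠ 0) ∧
  (¬(i = j ∨ i + j + 1 = n) → pvCell grid i j = 0)

-- Pre_ is exactly the inputs on which A returns (no IndexError): either every row has at
-- least n entries (the full scan stays in range), or A's scan meets a cell violating the
-- X-matrix rule before any missing entry (all rows above it full, the cell in its row).
def Pre_checkXMatrix (grid : List (List Int)) : Prop :=
  (∀ row ∈ grid, grid.length ≤ row.length) ∨
  (∃ i < grid.length, ∃ j < grid.length, j < (grid.getD i []).length ∧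
    (∀ i' < i, grid.length ≤ (grid.getD i' []).length) ∧ ¬ pvGood grid grid.length i j)
instance (grid : List (List Int)) : Decidable (Pre_checkXMatrix grid) := by
  unfold Pre_checkXMatrix; infer_instance

def pvWitness_checkXMatrix : List (List Int) := [[1, 1], [1, 1]]

def Spec_checkXMatrix (grid : List (List Int)) (out : Bool) : Prop := out = checkXMatrix_alt grid
instance (grid : List (List Int)) (out : Bool) : Decidable (Spec_checkXMatrix grid out) := by
  unfold Spec_checkXMatrix; infer_instance

-- ===== CLAIM (what is proved, stated in full; the proofs are below) =====
def Claim_equal_checkXMatrix : Prop := ∀ (grid : List (List Int)), Dom_checkXMatrix grid → Pre_checkXMatrix grid → Spec_checkXMatrix grid (checkXMatrix grid)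

-- ===== LEMMAS AND PROOFS =====

lemma pvAStep_eq (grid : List (List Int)) (i j : Nat)
    (hi : i < grid.length) (hj : j < (grid.getD i []).length) :
    pvAStep grid grid.length i j =
      some (if pvGood grid grid.length i j then none else some false) := by
  have hrow : PySem.List.pyGet? grid ((i : Nat) : Int) = some (grid.getD i []) := by
    rw [PySem.List.pyGet?_natCast, List.getElem?_eq_getElem hi, List.getD_eq_getElem _ _ hi]
  have hv : PySem.List.pyGet? (grid.getD i []) (j : Int) = some (pvCell grid i j) := by
    rw [PySem.List.pyGet?_natCast, List.getElem?_eq_getElem hj, pvCell,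
      List.getD_eq_getElem _ _ hj]
  simp only [pvAStep, hrow, hv]
  have e1 : ((i : Int) = (j : Int)) ↔ i = j := by omega
  have e2 : ((i : Int) = (grid.length : Int) - (j : Int) - 1) ↔ i + j + 1 = grid.length := by
    omega
  split_ifs with h1 h2 h3 h4 <;>
    simp [pvGood, e1, e2] at * <;> tauto

lemma pvALoopJ_eq (grid : List (List Int)) (i : Nat) (hi : i < grid.length)
    (js : List Int) (hjs : ∀ j ∈ js, 0 ≤ j ∧ j < ((grid.getD i []).length : Int)) :
    pvALoopJ grid grid.length i js =
      some (if ∀ j ∈ js, pvGood grid grid.length i j.toNat then none else some false) := by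
  induction js with
  | nil => simp [pvALoopJ]
  | cons j js ih =>
    obtain ⟨h0, hlt⟩ := hjs j (List.mem_cons_self ..)
    have hcast : ((j.toNat : Nat) : Int) = j := Int.toNat_of_nonneg h0
    have hjn : j.toNat < (grid.getD i []).length := by omega
    have hstep := pvAStep_eq grid i j.toNat hi hjn
    rw [hcast] at hstep
    simp only [pvALoopJ, hstep]
    by_cases hg : pvGood grid grid.length i j.toNat
    · simp only [if_pos hg]
      rw [ih (fun x hx => hjs x (List.mem_cons_of_mem _ hx))]
      have hiff : (∀ x ∈ js, pvGood grid grid.length i x.toNat) ↔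
          (∀ x ∈ j :: js, pvGood grid grid.length i x.toNat) := by
        rw [List.forall_mem_cons]; exact (and_iff_right hg).symm
      exact congrArg some (if_congr hiff rfl rfl)
    · simp only [if_neg hg]
      have hne : ¬ ∀ x ∈ j :: js, pvGood grid grid.length i x.toNat :=
        fun h => hg (h j (List.mem_cons_self ..))
      rw [if_neg hne]

lemma pvALoopJ_append (grid : List (List Int)) (n i : Int) (l1 l2 : List Int) :
    pvALoopJ grid n i (l1 ++ l2) =
      match pvALoopJ grid n i l1 with
      | some none => pvALoopJ grid n i l2
      | r => r := by
  induction l1 with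
  | nil => simp [pvALoopJ]
  | cons j js ih =>
    simp only [List.cons_append, pvALoopJ]
    cases pvAStep grid n i j with
    | none => rfl
    | some o => cases o with
      | none => exact ih
      | some b => rfl

lemma pvALoopJ_false (grid : List (List Int)) (i : Nat) (hi : i < grid.length)
    (hex : ∃ j : Nat, j < grid.length ∧ j < (grid.getD i []).length ∧
      ¬ pvGood grid grid.length i j) :
    pvALoopJ grid grid.length i (PySem.List.pyRange 0 grid.length) = some (some false) := by
  obtain ⟨j, hjn, hjl, hbad⟩ := hex
  have hsplit := PySem.List.pyRange_one_append 0 ((j : Int) + 1) (grid.length : Int)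
    (by omega) (by omega)
  rw [hsplit, pvALoopJ_append]
  have h1 := pvALoopJ_eq grid i hi (PySem.List.pyRange 0 ((j : Int) + 1))
    (fun x hx => by
      rw [PySem.List.mem_pyRange_one] at hx
      exact ⟨hx.1, by omega⟩)
  have hmem : (j : Int) ∈ PySem.List.pyRange 0 ((j : Int) + 1) := by
    rw [PySem.List.mem_pyRange_one]; omega
  have hnall : ¬ ∀ x ∈ PySem.List.pyRange 0 ((j : Int) + 1),
      pvGood grid grid.length i x.toNat := by
    intro hall
    exact hbad (by simpa using hall _ hmem)
  rw [h1, if_neg hnall]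

lemma pvALoopI_false (grid : List (List Int)) (is : List Int)
    (hpair : is.Pairwise (· < ·)) (hmem : ∀ i ∈ is, 0 ≤ i ∧ i < (grid.length : Int))
    (hex : ∃ i ∈ is,
      (∀ i' : Nat, (i' : Int) < i → grid.length ≤ (grid.getD i' []).length) ∧
      ∃ j : Nat, j < grid.length ∧ j < (grid.getD i.toNat []).length ∧
        ¬ pvGood grid grid.length i.toNat j) :
    pvALoopI grid grid.length is = some (some false) := by
  induction is with
  | nil => simp at hex
  | cons i0 is ih =>
    obtain ⟨h0, hlt⟩ := hmem i0 (List.mem_cons_self ..)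
    have hcast : ((i0.toNat : Nat) : Int) = i0 := Int.toNat_of_nonneg h0
    have hin : i0.toNat < grid.length := by omega
    obtain ⟨w, hw, hpre, hbad⟩ := hex
    rcases List.mem_cons.mp hw with rfl | hwtail
    · -- the bad row is the head
      have hfalse := pvALoopJ_false grid w.toNat hin hbad
      rw [hcast] at hfalse
      simp only [pvALoopI, hfalse]
    · -- the bad row is in the tail; the head row is full-length
      have hi0w : i0 < w := (List.pairwise_cons.mp hpair).1 w hwtail
      have hfull : grid.length ≤ (grid.getD i0.toNat []).length := by
        have := hpre i0.toNat (by omega)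
        exact this
      have hloop := pvALoopJ_eq grid i0.toNat hin (PySem.List.pyRange 0 grid.length)
        (fun x hx => by
          rw [PySem.List.mem_pyRange_one] at hx
          exact ⟨hx.1, by omega⟩)
      rw [hcast] at hloop
      simp only [pvALoopI, hloop]
      by_cases hg : ∀ x ∈ PySem.List.pyRange 0 (grid.length : Int),
          pvGood grid grid.length i0.toNat x.toNat
      · rw [if_pos hg]
        exact ih (List.pairwise_cons.mp hpair).2
          (fun x hx => hmem x (List.mem_cons_of_mem _ hx))
          ⟨w, hwtail, hpre, hbad⟩
      · rw [if_neg hg]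

lemma pvALoopI_eq (grid : List (List Int))
    (hwide : ∀ row ∈ grid, grid.length ≤ row.length)
    (is : List Int) (his : ∀ i ∈ is, 0 ≤ i ∧ i < (grid.length : Int)) :
    pvALoopI grid grid.length is =
      some (if ∀ i ∈ is, ∀ j ∈ PySem.List.pyRange 0 grid.length,
              pvGood grid grid.length i.toNat j.toNat then none else some false) := by
  induction is with
  | nil => simp [pvALoopI]
  | cons i is ih =>
    obtain ⟨h0, hlt⟩ := his i (List.mem_cons_self ..)
    have hcast : ((i.toNat : Nat) : Int) = i := Int.toNat_of_nonneg h0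
    have hin : i.toNat < grid.length := by omega
    have hfull : grid.length ≤ (grid.getD i.toNat []).length := by
      rw [List.getD_eq_getElem _ _ hin]
      exact hwide _ (List.getElem_mem hin)
    have hloop := pvALoopJ_eq grid i.toNat hin (PySem.List.pyRange 0 grid.length)
      (fun j hj => by rw [PySem.List.mem_pyRange_one] at hj; exact ⟨hj.1, by omega⟩)
    rw [hcast] at hloop
    simp only [pvALoopI, hloop]
    by_cases hg : ∀ j ∈ PySem.List.pyRange 0 (grid.length : Int), pvGood grid grid.length i.toNat j.toNat
    · rw [if_pos hg]
      have hred : (match (some none : Option (Option Bool)) with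
          | none => none
          | some (some b) => some (some b)
          | some none => pvALoopI grid (grid.length : Int) is) =
          pvALoopI grid (grid.length : Int) is := rfl
      rw [hred, ih (fun x hx => his x (List.mem_cons_of_mem _ hx))]
      have hcond : (∀ x ∈ i :: is, ∀ j ∈ PySem.List.pyRange 0 (grid.length : Int),
          pvGood grid grid.length x.toNat j.toNat) ↔
          (∀ x ∈ is, ∀ j ∈ PySem.List.pyRange 0 (grid.length : Int),
          pvGood grid grid.length x.toNat j.toNat) := by
        simp only [List.forall_mem_cons]
        exact and_iff_right hg
      rw [if_congr hcond rfl rfl]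
    · rw [if_neg hg]
      have hred : (match (some (some false) : Option (Option Bool)) with
          | none => none
          | some (some b) => some (some b)
          | some none => pvALoopI grid (grid.length : Int) is) =
          some (some false) := rfl
      rw [hred, if_neg (fun h => hg (h i (List.mem_cons_self ..)))]

lemma pvA_char (grid : List (List Int)) (hwide : ∀ row ∈ grid, grid.length ≤ row.length) :
    checkXMatrix grid = true ↔
      ∀ i < grid.length, ∀ j < grid.length, pvGood grid grid.length i j := by
  have h := pvALoopI_eq grid hwide (PySem.List.pyRange 0 grid.length)
    (fun i hi => by rw [PySem.List.mem_pyRange_one] at hi; exact hi)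
  simp only [checkXMatrix, h]
  by_cases hg : ∀ i ∈ PySem.List.pyRange 0 (grid.length : Int),
      ∀ j ∈ PySem.List.pyRange 0 (grid.length : Int), pvGood grid grid.length i.toNat j.toNat
  · simp only [if_pos hg]
    constructor
    · intro _ i hi j hj
      have := hg i (by rw [PySem.List.mem_pyRange_one]; omega)
        j (by rw [PySem.List.mem_pyRange_one]; omega)
      simpa using this
    · intro _; trivial
  · simp only [if_neg hg]
    constructor
    · intro h; simp at h
    · intro hP
      exfalso; apply hg
      intro i hi j hj
      rw [PySem.List.mem_pyRange_one] at hi hj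
      exact hP i.toNat (by omega) j.toNat (by omega)

lemma pvA_false (grid : List (List Int))
    (hrb : ∃ i < grid.length, ∃ j < grid.length, j < (grid.getD i []).length ∧
      (∀ i' < i, grid.length ≤ (grid.getD i' []).length) ∧
      ¬ pvGood grid grid.length i j) :
    checkXMatrix grid = false := by
  obtain ⟨i, hi, j, hjn, hjl, hpre, hbad⟩ := hrb
  have h := pvALoopI_false grid (PySem.List.pyRange 0 grid.length)
    (PySem.List.pairwise_lt_pyRange_one 0 grid.length)
    (fun x hx => by rw [PySem.List.mem_pyRange_one] at hx; exact hx)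
    ⟨(i : Int), by rw [PySem.List.mem_pyRange_one]; omega,
      fun i' hi' => hpre i' (by omega),
      by exact ⟨j, hjn, hjl, hbad⟩⟩
  simp only [checkXMatrix, h]

-- ===== B-side lemmas =====

-- membership in Source B's coordinate set of nonzero cells
lemma pvNZ_mem (grid : List (List Int)) (x : Int × Int) :
    x ∈ pvNZ grid (grid.length : Int) ↔
      ∃ i : Nat, i < grid.length ∧ ∃ j : Nat, j < grid.length ∧
        j < (grid.getD i []).length ∧ x = ((i : Int), (j : Int)) ∧ pvCell grid i j ≠ 0 := by
  rw [pvNZ, PySem.Set.mem_ofList, List.mem_flatMap]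
  constructor
  · rintro ⟨p, hp, hx⟩
    rw [PySem.List.mem_enumerate_iff] at hp
    obtain ⟨i, hi, rfl⟩ := hp
    dsimp only at hx
    rw [List.mem_filterMap] at hx
    obtain ⟨q, hq, hf⟩ := hx
    rw [PySem.List.slice_to_natCast, PySem.List.mem_enumerate_iff] at hq
    obtain ⟨j, hj, rfl⟩ := hq
    dsimp only at hf hj
    rw [List.length_take] at hj
    have hjl : j < grid[i].length := by omega
    have hjn : j < grid.length := by omega
    have hjt : j < (grid[i].take grid.length).length := by
      rw [List.length_take]; omega
    by_cases hz : (grid[i].take grid.length)[j] ≠ 0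
    · rw [if_pos hz] at hf
      refine ⟨i, hi, j, hjn, ?_, ?_, ?_⟩
      · rwa [List.getD_eq_getElem _ _ hi]
      · simpa using hf.symm
      · rw [pvCell, List.getD_eq_getElem _ _ hi, List.getD_eq_getElem _ _ hjl]
        rw [List.getElem_take] at hz
        simpa using hz
    · rw [if_neg hz] at hf; exact absurd hf (by simp)
  · rintro ⟨i, hi, j, hjn, hjl', rfl, hnz⟩
    have hjl : j < grid[i].length := by rwa [List.getD_eq_getElem _ _ hi] at hjl'
    refine ⟨((i : Int), grid[i]), ?_, ?_⟩
    · rw [PySem.List.mem_enumerate_iff]; exact ⟨i, hi, by simp⟩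
    · rw [List.mem_filterMap]
      have hj : j < (grid[i].take grid.length).length := by
        rw [List.length_take]; omega
      refine ⟨((j : Int), (grid[i].take grid.length)[j]), ?_, ?_⟩
      · rw [PySem.List.slice_to_natCast, PySem.List.mem_enumerate_iff]
        exact ⟨j, hj, by simp⟩
      · rw [pvCell, List.getD_eq_getElem _ _ hi, List.getD_eq_getElem _ _ hjl] at hnz
        rw [List.getElem_take]
        simp [hnz]

-- the two-diagonal coordinate set and its cardinality 2n - n%2
def pvDiag (n : Nat) : Finset (Int × Int) :=
  ((Finset.range n).image fun i : Nat => ((i : Int), (i : Int))) ∪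
  ((Finset.range n).image fun i : Nat => ((i : Int), (n : Int) - 1 - (i : Int)))

lemma pvPairEq {α β : Type} {a c : α} {b d : β} (h : (a, b) = (c, d)) : a = c ∧ b = d := by
  injection h with h1 h2; exact ⟨h1, h2⟩

lemma pvDiag_mem (n : Nat) (x : Int × Int) :
    x ∈ pvDiag n ↔ ∃ i : Nat, i < n ∧
      (x = ((i : Int), (i : Int)) ∨ x = ((i : Int), (n : Int) - 1 - (i : Int))) := by
  simp only [pvDiag, Finset.mem_union, Finset.mem_image, Finset.mem_range]
  constructor
  · rintro (⟨i, hi, rfl⟩ | ⟨i, hi, rfl⟩)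
    · exact ⟨i, hi, Or.inl rfl⟩
    · exact ⟨i, hi, Or.inr rfl⟩
  · rintro ⟨i, hi, rfl | rfl⟩
    · exact Or.inl ⟨i, hi, rfl⟩
    · exact Or.inr ⟨i, hi, rfl⟩

lemma pvDiag_card (n : Nat) : (pvDiag n).card = 2 * n - n % 2 := by
  have h1 : ((Finset.range n).image fun i : Nat => ((i : Int), (i : Int))).card = n := by
    rw [Finset.card_image_of_injective _ (fun a b h => by
      have := (pvPairEq h).1; exact_mod_cast this)]
    exact Finset.card_range n
  have h2 : ((Finset.range n).image fun i : Nat => ((i : Int), (n : Int) - 1 - (i : Int))).card = n := by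
    rw [Finset.card_image_of_injective _ (fun a b h => by
      have := (pvPairEq h).1; exact_mod_cast this)]
    exact Finset.card_range n
  have hinter : (((Finset.range n).image fun i : Nat => ((i : Int), (i : Int))) ∩
      ((Finset.range n).image fun i : Nat => ((i : Int), (n : Int) - 1 - (i : Int)))).card
        = n % 2 := by
    by_cases hodd : n % 2 = 1
    · have : (((Finset.range n).image fun i : Nat => ((i : Int), (i : Int))) ∩
          ((Finset.range n).image fun i : Nat => ((i : Int), (n : Int) - 1 - (i : Int)))) =
          {((((n - 1) / 2 : Nat) : Int), (((n - 1) / 2 : Nat) : Int))} := by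
        ext x
        simp only [Finset.mem_inter, Finset.mem_image, Finset.mem_range,
          Finset.mem_singleton]
        constructor
        · rintro ⟨⟨i, hi, rfl⟩, ⟨k, hk, hkx⟩⟩
          obtain ⟨e1, e2⟩ := pvPairEq hkx
          have : i = (n - 1) / 2 := by omega
          subst this; rfl
        · rintro rfl
          refine ⟨⟨(n - 1) / 2, by omega, rfl⟩, ⟨(n - 1) / 2, by omega, ?_⟩⟩
          have : ((n : Int) - 1 - (((n - 1) / 2 : Nat) : Int)) = (((n - 1) / 2 : Nat) : Int) := by
            omega
          rw [this]
      rw [this, Finset.card_singleton, hodd]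
    · have hev : n % 2 = 0 := by omega
      have : (((Finset.range n).image fun i : Nat => ((i : Int), (i : Int))) ∩
          ((Finset.range n).image fun i : Nat => ((i : Int), (n : Int) - 1 - (i : Int)))) = ∅ := by
        rw [Finset.eq_empty_iff_forall_notMem]
        intro x hx
        simp only [Finset.mem_inter, Finset.mem_image, Finset.mem_range] at hx
        obtain ⟨⟨i, hi, rfl⟩, ⟨k, hk, hkx⟩⟩ := hx
        obtain ⟨e1, e2⟩ := pvPairEq hkx
        omega
      rw [this, Finset.card_empty, hev]
  have := Finset.card_union_add_card_inter
    ((Finset.range n).image fun i : Nat => ((i : Int), (i : Int)))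
    ((Finset.range n).image fun i : Nat => ((i : Int), (n : Int) - 1 - (i : Int)))
  rw [h1, h2, hinter] at this
  have hle : n % 2 ≤ n := Nat.le_of_lt_succ (by omega)
  unfold pvDiag
  omega

-- unfolding Source B's result into its two conjuncts
lemma pvB_iff (grid : List (List Int)) :
    checkXMatrix_alt grid = true ↔
      (((pvNZ grid (grid.length : Int)).length : Int) =
        2 * (grid.length : Int) - (grid.length : Int) % 2 ∧
       ∀ i : Nat, i < grid.length →
         (((i : Int), (i : Int)) ∈ pvNZ grid (grid.length : Int) ∧
          ((i : Int), (grid.length : Int) - 1 - (i : Int)) ∈ pvNZ grid (grid.length : Int))) := by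
  have hmod : PySem.Int.mod (grid.length : Int) 2 = (grid.length : Int) % 2 :=
    PySem.Int.mod_eq_emod_of_pos (by omega)
  simp only [checkXMatrix_alt, Bool.and_eq_true, decide_eq_true_eq, List.all_eq_true,
    PySem.Set.contains_iff, hmod, PySem.Set.len]
  constructor
  · rintro ⟨hc, hall⟩
    refine ⟨by simpa [PySem.List.len] using hc, fun i hi => ?_⟩
    have := hall (i : Int) (by rw [PySem.List.mem_pyRange_one]; omega)
    simpa using this
  · rintro ⟨hc, hall⟩
    refine ⟨by simpa [PySem.List.len] using hc, fun x hx => ?_⟩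
    rw [PySem.List.mem_pyRange_one] at hx
    have := hall x.toNat (by omega)
    have hcast : ((x.toNat : Nat) : Int) = x := by omega
    rw [hcast] at this
    simpa using this

lemma pvNZ_nodup (grid : List (List Int)) :
    (pvNZ grid (grid.length : Int)).Nodup := PySem.Set.nodup_ofList _

-- if every cell is good and every row is full-length, Source B returns True
lemma pvB_good (grid : List (List Int))
    (hwide : ∀ row ∈ grid, grid.length ≤ row.length)
    (hgood : ∀ i < grid.length, ∀ j < grid.length, pvGood grid grid.length i j) :
    checkXMatrix_alt grid = true := by
  have hfull : ∀ i, i < grid.length → grid.length ≤ (grid.getD i []).length := by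
    intro i hi
    rw [List.getD_eq_getElem _ _ hi]
    exact hwide _ (List.getElem_mem hi)
  have hdiagmem : ∀ i : Nat, i < grid.length →
      (((i : Int), (i : Int)) ∈ pvNZ grid (grid.length : Int) ∧
       ((i : Int), (grid.length : Int) - 1 - (i : Int)) ∈ pvNZ grid (grid.length : Int)) := by
    intro i hi
    constructor
    · rw [pvNZ_mem]
      exact ⟨i, hi, i, hi, by have := hfull i hi; omega, rfl,
        (hgood i hi i hi).1 (Or.inl rfl)⟩
    · rw [pvNZ_mem]
      refine ⟨i, hi, grid.length - 1 - i, by omega, by have := hfull i hi; omega,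
        by rw [Prod.mk.injEq]; constructor <;> omega,
        (hgood i hi (grid.length - 1 - i) (by omega)).1 (Or.inr (by omega))⟩
  rw [pvB_iff]
  refine ⟨?_, hdiagmem⟩
  have hset : (pvNZ grid (grid.length : Int)).toFinset = pvDiag grid.length := by
    ext x
    rw [List.mem_toFinset, pvNZ_mem, pvDiag_mem]
    constructor
    · rintro ⟨i, hi, j, hjn, hjl, rfl, hnz⟩
      have hd : i = j ∨ i + j + 1 = grid.length := by
        by_contra hnd
        exact hnz ((hgood i hi j hjn).2 hnd)
      refine ⟨i, hi, ?_⟩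
      rcases hd with rfl | hd
      · exact Or.inl rfl
      · right; rw [Prod.mk.injEq]; constructor <;> omega
    · rintro ⟨i, hi, rfl | rfl⟩
      · exact ⟨i, hi, i, hi, by have := hfull i hi; omega, rfl,
          (hgood i hi i hi).1 (Or.inl rfl)⟩
      · refine ⟨i, hi, grid.length - 1 - i, by omega, by have := hfull i hi; omega,
          by rw [Prod.mk.injEq]; constructor <;> omega,
          (hgood i hi (grid.length - 1 - i) (by omega)).1 (Or.inr (by omega))⟩
  have hlen : (pvNZ grid (grid.length : Int)).length = (pvDiag grid.length).card := by
    rw [← hset, List.toFinset_card_of_nodup (pvNZ_nodup grid)]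
  rw [hlen, pvDiag_card]
  omega

-- a bad cell in range makes Source B return False
lemma pvB_bad (grid : List (List Int)) (i j : Nat)
    (hi : i < grid.length) (hjn : j < grid.length) (hjl : j < (grid.getD i []).length)
    (hbad : ¬ pvGood grid grid.length i j) :
    checkXMatrix_alt grid = false := by
  rw [← Bool.not_eq_true, pvB_iff]
  rintro ⟨hcount, hdiagmem⟩
  by_cases hd : i = j ∨ i + j + 1 = grid.length
  · -- a diagonal cell holds 0, so it cannot be in the nonzero-coordinate set
    have hz : pvCell grid i j = 0 := by
      by_contra hnz
      exact hbad ⟨fun _ => hnz, fun hnd => absurd hd hnd⟩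
    rcases hd with rfl | hd
    · obtain ⟨i', hi', j', hjn', hjl', hx, hnz⟩ := (pvNZ_mem grid _).mp (hdiagmem i hi).1
      obtain ⟨e1, e2⟩ := pvPairEq hx
      have : i' = i ∧ j' = i := by omega
      obtain ⟨rfl, rfl⟩ := this
      exact hnz hz
    · obtain ⟨i', hi', j', hjn', hjl', hx, hnz⟩ := (pvNZ_mem grid _).mp (hdiagmem i hi).2
      obtain ⟨e1, e2⟩ := pvPairEq hx
      have : i' = i ∧ j' = j := by omega
      obtain ⟨rfl, rfl⟩ := this
      exact hnz hz
  · -- an off-diagonal nonzero cell forces the set past the diagonal cardinality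
    have hnz : pvCell grid i j ≠ 0 := by
      by_contra h0
      exact hbad ⟨fun hdd => absurd hdd hd, fun _ => h0⟩
    have hxin : ((i : Int), (j : Int)) ∈ pvNZ grid (grid.length : Int) :=
      (pvNZ_mem grid _).mpr ⟨i, hi, j, hjn, hjl, rfl, hnz⟩
    have hxout : ((i : Int), (j : Int)) ∉ pvDiag grid.length := by
      rw [pvDiag_mem]
      rintro ⟨k, hk, hx | hx⟩ <;>
        · obtain ⟨e1, e2⟩ := pvPairEq hx
          omega
    have hsub : insert ((i : Int), (j : Int)) (pvDiag grid.length) ⊆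
        (pvNZ grid (grid.length : Int)).toFinset := by
      intro x hx
      rw [Finset.mem_insert] at hx
      rw [List.mem_toFinset]
      rcases hx with rfl | hx
      · exact hxin
      · rw [pvDiag_mem] at hx
        obtain ⟨k, hk, rfl | rfl⟩ := hx
        · exact (hdiagmem k hk).1
        · exact (hdiagmem k hk).2
    have hcard := Finset.card_le_card hsub
    rw [Finset.card_insert_of_notMem hxout, pvDiag_card,
      List.toFinset_card_of_nodup (pvNZ_nodup grid)] at hcard
    omega

-- ===== VERDICT (by name: the statement is the Claim_ definition above) =====
theorem checkXMatrix_spec : Claim_equal_checkXMatrix := by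
  intro grid _ hpre
  unfold Spec_checkXMatrix
  by_cases hrb : ∃ i < grid.length, ∃ j < grid.length, j < (grid.getD i []).length ∧
      (∀ i' < i, grid.length ≤ (grid.getD i' []).length) ∧ ¬ pvGood grid grid.length i j
  · rw [pvA_false grid hrb]
    obtain ⟨i, hi, j, hjn, hjl, _, hbad⟩ := hrb
    exact (pvB_bad grid i j hi hjn hjl hbad).symm
  · have hwide : ∀ row ∈ grid, grid.length ≤ row.length := by
      rcases hpre with h | h
      · exact h
      · exact absurd h hrb
    have hgood : ∀ i < grid.length, ∀ j < grid.length, pvGood grid grid.length i j := by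
      intro i hi j hj
      by_contra hb
      apply hrb
      exact ⟨i, hi, j, hj, by
          have := hwide _ (List.getElem_mem hi)
          rw [List.getD_eq_getElem _ _ hi]; omega,
        fun i' hlt => by
          have hi' : i' < grid.length := by omega
          rw [List.getD_eq_getElem _ _ hi']
          exact hwide _ (List.getElem_mem hi'),
        hb⟩
    rw [(pvA_char grid hwide).mpr hgood, (pvB_good grid hwide hgood)]
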